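-- pv_equiv track=rewrite | github.com/nazirite96/pythonStudy | level_primary/A강조.py | solution
-- ===== SOURCE A (Python) =====
-- def solution(myString):
--     answer = ''
--     str_list = list(myString)
--     for i,str in enumerate(str_list):
--         if str == 'a' or str == 'A':
--             str_list[i] = 'A'
--         else:
--             str_list[i] = str.lower()
--     return answer.join(str_list)
-- ===== SOURCE B (Python) =====
-- def solution(myString):
--     return myString.lower().replace('a', 'A')
-- ===== Notes on version B (the rewrite author's own statement) =====
-- stated objective: idiomatic
-- what changed: B replaces A's per-character enumerate loop with in-place list mutation by two whole-string operations: lowercase everything, then use str.replace to re-uppercase the target letter.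
import Mathlib
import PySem

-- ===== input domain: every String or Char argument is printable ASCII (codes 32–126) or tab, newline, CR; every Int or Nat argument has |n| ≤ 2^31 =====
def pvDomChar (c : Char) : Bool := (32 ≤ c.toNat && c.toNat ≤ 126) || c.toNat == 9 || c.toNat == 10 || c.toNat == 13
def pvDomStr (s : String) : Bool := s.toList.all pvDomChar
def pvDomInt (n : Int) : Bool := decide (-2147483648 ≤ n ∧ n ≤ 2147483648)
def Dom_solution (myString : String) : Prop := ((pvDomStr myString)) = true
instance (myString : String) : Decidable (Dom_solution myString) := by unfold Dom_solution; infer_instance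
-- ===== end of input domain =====

-- B lowercases the whole string and then replaces every 'a' by 'A' — two string-level passes instead of A's per-character branch.

-- ===== PORT A =====
def solution (myString : String) : String :=
  -- answer = ''; str_list = list(myString); for i,str in enumerate(str_list): overwrite in place
  let strList := myString.toList
  let strList := strList.map (fun str => if str = 'a' ∨ str = 'A' then 'A' else PySem.Chars.lowerChar str)
  -- answer.join(str_list) with answer = ''
  String.ofList (PySem.Chars.join [] (strList.map (fun c => [c])))

-- ===== PORT B =====
def solution_alt (myString : String) : String :=
  PySem.Str.replace (PySem.Str.lower myString) "a" "A"

-- ===== PRECONDITION & SPEC =====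
def Spec_solution (myString : String) (out : String) : Prop := out = solution_alt myString
instance (myString : String) (out : String) : Decidable (Spec_solution myString out) := by unfold Spec_solution; infer_instance

-- ===== CLAIM (what is proved, stated in full; the proofs are below) =====
def Claim_equal_solution : Prop := ∀ (myString : String), Dom_solution myString → Spec_solution myString (solution myString)

-- ===== LEMMAS AND PROOFS =====

-- replace.go with a single-char pattern is a map
lemma replace_go_singleton (new : List Char) (p : Char) :
    ∀ (fuel : Nat) (l acc : List Char), l.length ≤ fuel →
      PySem.Chars.replace.go [p] new fuel l acc =
        acc.reverse ++ l.flatMap (fun c => if c = p then new else [c]) := by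
  intro fuel
  induction fuel with
  | zero =>
    intro l acc h
    have : l = [] := List.eq_nil_of_length_eq_zero (Nat.le_zero.mp h)
    subst this
    simp [PySem.Chars.replace.go]
  | succ n ih =>
    intro l acc h
    cases l with
    | nil => simp [PySem.Chars.replace.go]
    | cons c t =>
      simp only [PySem.Chars.replace.go]
      by_cases hc : c = p
      · subst hc
        have hp : [c].isPrefixOf (c :: t) = true := by simp [List.isPrefixOf]
        rw [if_pos hp]
        simp only [List.length_cons, List.length_nil, List.drop_succ_cons, List.drop_zero]
        rw [ih t (new.reverse ++ acc) (by simpa using Nat.le_of_succ_le_succ h)]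
        simp [List.flatMap_cons]
      · have hp : [p].isPrefixOf (c :: t) = false := by
          simp [List.isPrefixOf]; exact fun h' => (hc h'.symm).elim
        rw [if_neg (by simp [hp])]
        rw [ih t (c :: acc) (by simpa using Nat.le_of_succ_le_succ h)]
        simp [List.flatMap_cons, hc]

lemma replace_singleton (l : List Char) (p : Char) (new : List Char) :
    PySem.Chars.replace l [p] new = l.flatMap (fun c => if c = p then new else [c]) := by
  rw [PySem.Chars.replace]
  simp only [if_neg (by simp : ¬ ([p].isEmpty = true))]
  simpa using replace_go_singleton new p l.length l [] le_rfl

lemma lowerChar_eq_a_iff (c : Char) : PySem.Chars.lowerChar c = 'a' ↔ (c = 'a' ∨ c = 'A') := by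
  unfold PySem.Chars.lowerChar PySem.Chars.isupper
  constructor
  · intro h
    by_cases hu : ('A' ≤ c ∧ c ≤ 'Z')
    · rw [if_pos (by simpa using hu)] at h
      right
      have h65 : 65 ≤ c.toNat := by
        have h2 := (Char.le_def).mp hu.1
        have : ('A':Char).val.toNat ≤ c.val.toNat := by exact_mod_cast h2
        simpa using this
      have h90 : c.toNat ≤ 90 := by
        have h2 := (Char.le_def).mp hu.2
        have : c.val.toNat ≤ ('Z':Char).val.toNat := by exact_mod_cast h2
        simpa using this
      have hv : (Char.ofNat (c.toNat + 32)).toNat = c.toNat + 32 := by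
        rw [Char.toNat_ofNat, if_pos]; left; omega
      have h97 : (Char.ofNat (c.toNat + 32)).toNat = ('a' : Char).toNat := by rw [h]
      have hc65 : c.toNat = 65 := by
        rw [hv] at h97; simp at h97; omega
      have : c.val = ('A' : Char).val := by
        apply UInt32.toNat_inj.mp; simpa using hc65
      exact Char.ext this
    · rw [if_neg (by simpa using hu)] at h
      exact Or.inl h
  · rintro (h | h) <;> subst h <;> decide

lemma map_eq (c : Char) :
    (if PySem.Chars.lowerChar c = 'a' then ['A'] else [PySem.Chars.lowerChar c]) =
      [if c = 'a' ∨ c = 'A' then 'A' else PySem.Chars.lowerChar c] := by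
  by_cases h : c = 'a' ∨ c = 'A'
  · rw [if_pos ((lowerChar_eq_a_iff c).mpr h), if_pos h]
  · rw [if_neg (fun hl => h ((lowerChar_eq_a_iff c).mp hl)), if_neg h]

-- ===== VERDICT (by name: the statement is the Claim_ definition above) =====
theorem solution_spec : Claim_equal_solution := by
  intro s _
  show _ = _
  unfold solution solution_alt
  apply String.ext
  simp only [PySem.Str.toList_replace, PySem.Str.toList_lower]
  rw [show ("a" : String).toList = ['a'] from rfl, show ("A" : String).toList = ['A'] from rfl,
      replace_singleton]
  unfold PySem.Chars.lower
  rw [List.flatMap_map]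
  rw [PySem.Chars.join_nil_singletons]
  simp only [String.toList_ofList]
  simp only [map_eq]
  induction s.toList with
  | nil => rfl
  | cons c t ih2 => simp [List.flatMap_cons, ih2]
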